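-- pv_equiv track=rewrite | github.com/Om7035/butterfly-effect | backend/butterfly/extraction/ner.py | _classify_system
-- ===== SOURCE A (Python) =====
-- def _classify_system(kw: str) -> str:
--     if any(w in kw for w in ("market", "exchange", "financial", "banking", "swift", "credit", "bond", "equity")):
--         return "financial"
--     if any(w in kw for w in ("supply chain", "supply-chain", "logistics", "port", "shipping")):
--         return "supply_chain"
--     if any(w in kw for w in ("grid", "pipeline", "energy")):
--         return "energy_grid"
--     if any(w in kw for w in ("healthcare", "hospital")):
--         return "healthcare"
--     if any(w in kw for w in ("internet", "network", "bandwidth")):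
--         return "digital"
--     return "infrastructure"
-- ===== SOURCE B (Python) =====
-- # B: position-wise scan — walk the suffixes of kw once, test keyword groups as
-- # prefixes (str.startswith with a tuple) and keep the minimal-priority hit.
-- _RULES = [
--     ("financial", ("market", "exchange", "financial", "banking", "swift", "credit", "bond", "equity")),
--     ("supply_chain", ("supply chain", "supply-chain", "logistics", "port", "shipping")),
--     ("energy_grid", ("grid", "pipeline", "energy")),
--     ("healthcare", ("healthcare", "hospital")),
--     ("digital", ("internet", "network", "bandwidth")),
-- ]
--
-- def _classify_system(kw: str) -> str:
--     best = len(_RULES)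
--     for i in range(len(kw)):
--         suffix = kw[i:]
--         for pri, (_, words) in enumerate(_RULES):
--             if pri < best and suffix.startswith(words):
--                 best = pri
--     return _RULES[best][0] if best < len(_RULES) else "infrastructure"
-- ===== Notes on version B (the rewrite author's own statement) =====
-- stated objective: alternative
-- what changed: Instead of testing each keyword for substring membership group by group, B walks the suffix positions of kw once and tests the keyword groups as prefixes of each suffix (str.startswith with a tuple), keeping the minimal matching group priority in an accumulator; the default falls out of the sentinel priority.
import Mathlib
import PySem

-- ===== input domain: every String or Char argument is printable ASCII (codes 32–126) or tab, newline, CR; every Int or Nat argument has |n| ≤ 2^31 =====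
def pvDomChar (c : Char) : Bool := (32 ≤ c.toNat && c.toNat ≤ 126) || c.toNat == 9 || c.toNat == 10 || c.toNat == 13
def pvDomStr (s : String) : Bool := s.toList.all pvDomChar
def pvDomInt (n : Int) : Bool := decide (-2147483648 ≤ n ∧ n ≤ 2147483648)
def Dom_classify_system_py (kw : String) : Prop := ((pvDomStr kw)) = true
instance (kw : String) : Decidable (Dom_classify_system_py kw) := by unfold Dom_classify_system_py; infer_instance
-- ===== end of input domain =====

-- B scans the suffixes of kw once with prefix tests and a minimal-priority accumulator,
-- instead of A's per-keyword substring-membership chain (alternative decomposition, same cost class).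


-- ===== PORT A =====
def classify_system_py (kw : String) : String :=
  if ["market", "exchange", "financial", "banking", "swift", "credit", "bond", "equity"].any
      (fun w => PySem.Str.isIn w kw) then "financial"
  else if ["supply chain", "supply-chain", "logistics", "port", "shipping"].any
      (fun w => PySem.Str.isIn w kw) then "supply_chain"
  else if ["grid", "pipeline", "energy"].any (fun w => PySem.Str.isIn w kw) then "energy_grid"
  else if ["healthcare", "hospital"].any (fun w => PySem.Str.isIn w kw) then "healthcare"
  else if ["internet", "network", "bandwidth"].any (fun w => PySem.Str.isIn w kw) then "digital"
  else "infrastructure"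

-- ===== PORT B =====
def pvRules : List (String × List String) :=
  [("financial", ["market", "exchange", "financial", "banking", "swift", "credit", "bond", "equity"]),
   ("supply_chain", ["supply chain", "supply-chain", "logistics", "port", "shipping"]),
   ("energy_grid", ["grid", "pipeline", "energy"]),
   ("healthcare", ["healthcare", "hospital"]),
   ("digital", ["internet", "network", "bandwidth"])]

-- Source B: best = 5; for i in range(len(kw)): suffix = kw[i:]; for pri, (_, words) in enumerate(_RULES):
--   if pri < best and suffix.startswith(words): best = pri    (startswith on a tuple = any-of-prefixes)
-- return _RULES[best][0] if best < 5 else "infrastructure"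
def classify_system_py_alt (kw : String) : String :=
  let s := kw.toList
  let best : Int :=
    (PySem.List.pyRange 0 (s.length : Int) 1).foldl
      (fun b i =>
        let suf := PySem.List.slice s (some i) none
        (PySem.List.enumerate pvRules 0).foldl
          (fun b2 pc =>
            if pc.1 < b2 ∧ pc.2.2.any (fun w => PySem.Chars.startswith suf w.toList) then pc.1 else b2)
          b)
      5
  if best < 5 then (PySem.List.pyGetD pvRules best ("infrastructure", [])).1 else "infrastructure"

-- ===== PRECONDITION & SPEC =====
def Spec_classify_system_py (kw : String) (out : String) : Prop := out = classify_system_py_alt kw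
instance (kw : String) (out : String) : Decidable (Spec_classify_system_py kw out) := by unfold Spec_classify_system_py; infer_instance

-- ===== CLAIM (what is proved, stated in full; the proofs are below) =====
def Claim_equal_classify_system_py : Prop := ∀ (kw : String), Dom_classify_system_py kw → Spec_classify_system_py kw (classify_system_py kw)

-- ===== LEMMAS AND PROOFS =====

-- the j-th keyword group, B's per-suffix group test, and the first matching priority of one suffix
def pvGrp (j : Nat) : List String := (pvRules.getD j ("", [])).2

def pvHit (s : List Char) (j : Nat) (i : Int) : Bool :=
  (pvGrp j).any (fun w => PySem.Chars.startswith (PySem.List.slice s (some i) none) w.toList)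

def pvFirst (s : List Char) (i : Int) : Int :=
  if pvHit s 0 i then 0 else if pvHit s 1 i then 1 else if pvHit s 2 i then 2
  else if pvHit s 3 i then 3 else if pvHit s 4 i then 4 else 5

-- overall first matching priority over a set of suffix positions (5 = no match)
def pvT (s : List Char) (l : List Int) : Int :=
  if l.any (pvHit s 0) then 0 else if l.any (pvHit s 1) then 1
  else if l.any (pvHit s 2) then 2 else if l.any (pvHit s 3) then 3
  else if l.any (pvHit s 4) then 4 else 5

-- B's inner fold over the literal rule table is "min with the first matching priority of this suffix"
theorem inner_eq_min (s : List Char) (i b : Int) (hb : b ≤ 5) :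
    (PySem.List.enumerate pvRules 0).foldl
      (fun b2 pc =>
        if pc.1 < b2 ∧ pc.2.2.any (fun w =>
            PySem.Chars.startswith (PySem.List.slice s (some i) none) w.toList) then pc.1 else b2)
      b = min b (pvFirst s i) := by
  simp only [pvRules, PySem.List.enumerate_cons, PySem.List.enumerate_nil, List.foldl_cons, List.foldl_nil]
  unfold pvFirst pvHit pvGrp
  simp only [pvRules, List.getD_cons_zero, List.getD_cons_succ]
  norm_num only
  generalize (["market", "exchange", "financial", "banking", "swift", "credit", "bond", "equity"] : List String).any (fun w => PySem.Chars.startswith (PySem.List.slice s (some i) none) w.toList) = c0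
  generalize (["supply chain", "supply-chain", "logistics", "port", "shipping"] : List String).any (fun w => PySem.Chars.startswith (PySem.List.slice s (some i) none) w.toList) = c1
  generalize (["grid", "pipeline", "energy"] : List String).any (fun w => PySem.Chars.startswith (PySem.List.slice s (some i) none) w.toList) = c2
  generalize (["healthcare", "hospital"] : List String).any (fun w => PySem.Chars.startswith (PySem.List.slice s (some i) none) w.toList) = c3
  generalize (["internet", "network", "bandwidth"] : List String).any (fun w => PySem.Chars.startswith (PySem.List.slice s (some i) none) w.toList) = c4
  cases c0 <;> cases c1 <;> cases c2 <;> cases c3 <;> cases c4 <;>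
    simp only [and_true, Bool.false_eq_true, and_false, if_false, if_true] <;>
    (first | (split_ifs <;> omega) | omega)

theorem pvFirst_le (s : List Char) (i : Int) : pvFirst s i ≤ 5 := by
  unfold pvFirst; split_ifs <;> omega

theorem min_first_T (c0 c1 c2 c3 c4 A0 A1 A2 A3 A4 : Bool) :
    min (if c0 = true then (0:Int) else if c1 = true then 1 else if c2 = true then 2
          else if c3 = true then 3 else if c4 = true then 4 else 5)
        (if A0 = true then 0 else if A1 = true then 1 else if A2 = true then 2
          else if A3 = true then 3 else if A4 = true then 4 else 5) =
      (if (c0 || A0) = true then 0 else if (c1 || A1) = true then 1 else if (c2 || A2) = true then 2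
          else if (c3 || A3) = true then 3 else if (c4 || A4) = true then 4 else 5) := by
  revert c0 c1 c2 c3 c4 A0 A1 A2 A3 A4
  decide

theorem pvT_cons (s : List Char) (i : Int) (l : List Int) :
    min (pvFirst s i) (pvT s l) = pvT s (i :: l) := by
  unfold pvT pvFirst
  simp only [List.any_cons]
  exact min_first_T _ _ _ _ _ _ _ _ _ _

theorem pvT_le (s : List Char) (l : List Int) : pvT s l ≤ 5 := by
  unfold pvT; split_ifs <;> omega

-- B's whole double loop in closed form
theorem outer_eq (s : List Char) (l : List Int) : ∀ b : Int, b ≤ 5 →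
    l.foldl
      (fun b i =>
        (PySem.List.enumerate pvRules 0).foldl
          (fun b2 pc =>
            if pc.1 < b2 ∧ pc.2.2.any (fun w =>
                PySem.Chars.startswith (PySem.List.slice s (some i) none) w.toList) then pc.1 else b2)
          b)
      b = min b (pvT s l) := by
  induction l with
  | nil => intro b hb; unfold pvT; simp only [List.foldl_nil, List.any_nil, if_false, Bool.false_eq_true]; omega
  | cons i l ih =>
      intro b hb
      simp only [List.foldl_cons]
      rw [inner_eq_min s i b hb, ih _ (by have := pvFirst_le s i; omega), min_assoc, pvT_cons]

-- a nonempty word is a substring iff it is a prefix of some suffix kw[i:] with 0 ≤ i < len(kw)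
theorem isIn_iff_hit (w : String) (s : List Char) (hw : w.toList ≠ []) :
    PySem.Chars.isIn w.toList s =
      (PySem.List.pyRange 0 (s.length : Int) 1).any
        (fun i => PySem.Chars.startswith (PySem.List.slice s (some i) none) w.toList) := by
  rw [Bool.eq_iff_iff, ← PySem.Chars.exists_prefix_drop_iff_isIn]
  simp only [List.any_eq_true, PySem.List.mem_pyRange_one]
  constructor
  · rintro ⟨j, hj⟩
    have hjlt : j < s.length := by
      by_contra h
      rw [List.drop_eq_nil_of_le (by omega)] at hj
      exact hw (List.prefix_nil.mp hj)
    refine ⟨(j : Int), ⟨by exact_mod_cast Nat.zero_le j, by exact_mod_cast hjlt⟩, ?_⟩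
    rw [PySem.Chars.startswith_iff]
    simp only [PySem.List.slice_from_natCast]
    exact hj
  · rintro ⟨i, ⟨h0, _⟩, hs⟩
    rw [PySem.Chars.startswith_iff] at hs
    rw [show i = ((i.toNat : Nat) : Int) from (Int.toNat_of_nonneg h0).symm] at hs
    simp only [PySem.List.slice_from_natCast] at hs
    exact ⟨i.toNat, hs⟩

-- group version: A's any-substring test = B's any-suffix-any-prefix test
theorem group_iff (ws : List String) (s : List Char) (hw : ∀ w ∈ ws, w.toList ≠ []) :
    ws.any (fun w => PySem.Chars.isIn w.toList s) =
      (PySem.List.pyRange 0 (s.length : Int) 1).any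
        (fun i => ws.any (fun w => PySem.Chars.startswith (PySem.List.slice s (some i) none) w.toList)) := by
  rw [Bool.eq_iff_iff]
  simp only [List.any_eq_true]
  constructor
  · rintro ⟨w, hwmem, hin⟩
    rw [isIn_iff_hit w s (hw w hwmem)] at hin
    simp only [List.any_eq_true] at hin
    obtain ⟨i, him, hst⟩ := hin
    exact ⟨i, him, w, hwmem, hst⟩
  · rintro ⟨i, him, w, hwmem, hst⟩
    refine ⟨w, hwmem, ?_⟩
    rw [isIn_iff_hit w s (hw w hwmem)]
    simp only [List.any_eq_true]
    exact ⟨i, him, hst⟩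

-- ===== VERDICT (by name: the statement is the Claim_ definition above) =====
theorem classify_system_py_spec : Claim_equal_classify_system_py := by
  intro kw _
  unfold Spec_classify_system_py classify_system_py classify_system_py_alt
  simp only [PySem.Str.isIn_eq]
  rw [outer_eq kw.toList _ 5 (by norm_num),
      min_eq_right (pvT_le kw.toList _)]
  have g0 := group_iff (pvGrp 0) kw.toList (by decide)
  have g1 := group_iff (pvGrp 1) kw.toList (by decide)
  have g2 := group_iff (pvGrp 2) kw.toList (by decide)
  have g3 := group_iff (pvGrp 3) kw.toList (by decide)
  have g4 := group_iff (pvGrp 4) kw.toList (by decide)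
  simp only [pvGrp, pvRules, List.getD_cons_zero, List.getD_cons_succ] at g0 g1 g2 g3 g4
  simp only [g0, g1, g2, g3, g4]
  unfold pvT pvHit pvGrp
  simp only [pvRules, List.getD_cons_zero, List.getD_cons_succ]
  split_ifs <;> simp [PySem.List.pyGetD] <;> omega
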